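-- pv_equiv track=rewrite | github.com/sharuk2k3/FS-Elite-2021-22 | Day-49/Day_49_P_2.py | distinctColor
-- ===== SOURCE A (Python) =====
-- from collections import defaultdict
--
-- def distinctColor(n, arr):
--     #d = {}
--     d = defaultdict(int)
--     for i in arr:
--         d[i] += 1
--
--     s = set()
--     for i, j in d.items():
--         if j not in s:
--             s.add(j)
--         else:
--             return False
--     return True
-- ===== SOURCE B (Python) =====
-- from collections import Counter
--
-- def distinctColor(n, arr):
--     vals = sorted(Counter(arr).values())
--     return all(a != b for a, b in zip(vals, vals[1:]))
-- ===== Notes on version B (the rewrite author's own statement) =====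
-- stated objective: alternative
-- what changed: Replaces the incremental hash-set membership test over dict values with sorting the frequency values and a single adjacent-pair scan for duplicates.
import Mathlib
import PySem

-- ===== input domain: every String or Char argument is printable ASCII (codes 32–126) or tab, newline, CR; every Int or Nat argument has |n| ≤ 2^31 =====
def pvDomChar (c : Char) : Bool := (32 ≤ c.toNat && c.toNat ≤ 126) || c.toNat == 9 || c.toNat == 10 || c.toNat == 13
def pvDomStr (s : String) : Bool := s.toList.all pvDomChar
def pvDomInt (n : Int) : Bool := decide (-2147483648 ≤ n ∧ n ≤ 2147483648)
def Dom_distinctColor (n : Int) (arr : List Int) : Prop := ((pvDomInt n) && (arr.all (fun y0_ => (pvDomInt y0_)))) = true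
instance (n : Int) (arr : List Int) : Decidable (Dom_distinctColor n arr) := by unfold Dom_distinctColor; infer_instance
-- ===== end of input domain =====

-- B replaces A's incremental set-membership test over the dict values by sorting the
-- frequency values and scanning adjacent pairs for a duplicate (alternative decomposition).

-- ===== PORT A =====
-- the 'for i, j in d.items(): if j not in s: s.add(j) else: return False' loop with its early return
def pvCheckA : List (Int × Int) → PySem.Set Int → Bool
  | [], _ => true
  | (_, j) :: rest, s =>
    if ¬ (PySem.Set.contains s j = true) then pvCheckA rest (PySem.Set.add s j)
    else false

def distinctColor (n : Int) (arr : List Int) : Bool :=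
  let d : PySem.Dict Int Int := arr.foldl (fun d i => d.modify i 0 (· + 1)) PySem.Dict.empty
  pvCheckA d.items PySem.Set.empty

-- ===== PORT B =====
def distinctColor_alt (n : Int) (arr : List Int) : Bool :=
  let vals := PySem.List.sorted (PySem.Dict.counter arr).values (fun x => x) false
  (vals.zip (vals.drop 1)).all (fun p => p.1 != p.2)

-- ===== PRECONDITION & SPEC =====
def Spec_distinctColor (n : Int) (arr : List Int) (out : Bool) : Prop := out = distinctColor_alt n arr
instance (n : Int) (arr : List Int) (out : Bool) : Decidable (Spec_distinctColor n arr out) := by unfold Spec_distinctColor; infer_instance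

-- ===== CLAIM (what is proved, stated in full; the proofs are below) =====
def Claim_equal_distinctColor : Prop := ∀ (n : Int) (arr : List Int), Dom_distinctColor n arr → Spec_distinctColor n arr (distinctColor n arr)

-- ===== LEMMAS AND PROOFS =====

-- A's set loop succeeds iff the values are pairwise distinct and none is already in s
lemma pvCheckA_eq_true_iff (l : List (Int × Int)) :
    ∀ s : PySem.Set Int, pvCheckA l s = true ↔
      ((l.map Prod.snd).Nodup ∧ ∀ j ∈ l.map Prod.snd, j ∉ s) := by
  induction l with
  | nil => intro s; simp [pvCheckA]
  | cons p rest ih =>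
    intro s
    obtain ⟨i, j⟩ := p
    by_cases hj : j ∈ s
    · simp only [pvCheckA, List.map_cons, List.nodup_cons, List.mem_cons]
      rw [if_neg (by simp [hj])]
      simp only [Bool.false_eq_true, false_iff, not_and]
      intro _ hall
      exact (hall j (Or.inl rfl)) hj
    · simp only [pvCheckA, List.map_cons, List.nodup_cons, List.mem_cons]
      rw [if_pos (by simp [hj]), ih]
      constructor
      · rintro ⟨hnd, hall⟩
        refine ⟨⟨?_, hnd⟩, ?_⟩
        · intro hmem
          have := hall j hmem
          rw [PySem.Set.mem_add] at this
          exact this (Or.inr rfl)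
        · intro x hx
          rcases hx with rfl | hx
          · exact hj
          · have := hall x hx
            rw [PySem.Set.mem_add] at this
            exact fun h => this (Or.inl h)
      · rintro ⟨⟨hnj, hnd⟩, hall⟩
        refine ⟨hnd, ?_⟩
        intro x hx
        rw [PySem.Set.mem_add]
        rintro (h | rfl)
        · exact (hall x (Or.inr hx)) h
        · exact hnj hx

-- on a (≤)-sorted list, no two adjacent elements equal iff the whole list has no duplicate
lemma adj_ne_iff_nodup : ∀ (l : List Int), l.Pairwise (· ≤ ·) →
    (((l.zip (l.drop 1)).all (fun p => p.1 != p.2)) = true ↔ l.Nodup) := by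
  intro l
  induction l with
  | nil => simp
  | cons a t ih =>
    intro hp
    cases t with
    | nil => simp
    | cons b u =>
      have hp' : (b :: u).Pairwise (· ≤ ·) := hp.tail
      have hab : a ≤ b := List.rel_of_pairwise_cons hp (List.mem_cons_self)
      have hih := ih hp'
      simp only [List.drop_one, List.tail_cons] at hih ⊢
      simp only [List.zip_cons_cons, List.all_cons, Bool.and_eq_true, bne_iff_ne, ne_eq,
        List.nodup_cons, List.mem_cons] at hih ⊢
      rw [hih]
      constructor
      · rintro ⟨hne, hnm, hnd⟩
        refine ⟨?_, hnm, hnd⟩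
        rintro (rfl | hmem)
        · exact hne rfl
        · exact hne (le_antisymm hab (List.rel_of_pairwise_cons hp' hmem))
      · rintro ⟨hnm, hnd⟩
        exact ⟨fun h => hnm (Or.inl h), hnd⟩

-- ===== VERDICT (by name: the statement is the Claim_ definition above) =====
theorem distinctColor_spec : Claim_equal_distinctColor := by
  intro n arr _
  unfold Spec_distinctColor distinctColor distinctColor_alt
  rw [Bool.eq_iff_iff]
  have hA := pvCheckA_eq_true_iff ((arr.foldl (fun d i => d.modify i 0 (· + 1)) PySem.Dict.empty : PySem.Dict Int Int).items) PySem.Set.empty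
  have hcnt : (arr.foldl (fun d i => d.modify i 0 (· + 1)) PySem.Dict.empty : PySem.Dict Int Int) = PySem.Dict.counter arr := (PySem.Dict.counter_eq_foldl arr).symm
  have hsorted := PySem.List.sorted_pairwise (PySem.Dict.counter arr).values (fun x => x)
  have hperm := PySem.List.sorted_perm (PySem.Dict.counter arr).values (fun x => x) false
  simp only [hcnt]
  rw [hcnt] at hA
  simp only [hA, adj_ne_iff_nodup _ hsorted, hperm.nodup_iff]
  constructor
  · rintro ⟨hnd, -⟩
    simpa [PySem.Dict.values] using hnd
  · intro hnd
    refine ⟨by simpa [PySem.Dict.values] using hnd, ?_⟩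
    intro j _
    simp [PySem.Set.empty]
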